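-- pv_equiv track=rewrite | github.com/miliar/Code_Jam_Webscraper | solutions_python/Problem_199/3768.py | flipIt
-- ===== SOURCE A (Python) =====
-- def flipIt(from_i,len_fp,inp_str):
--
--     if from_i > len(inp_str) - len_fp:
--         return inp_str
--     temp = ""
--
--     for i in inp_str[from_i:from_i+len_fp]:
--         if i == '+':
--             temp += '-'
--         else:
--             temp += '+'
--     if from_i == 0:
--         return temp + inp_str[from_i+len_fp : len(inp_str)]
--     else:
--         if from_i+len_fp < len(inp_str):
--             return inp_str[0 : from_i ] + temp + inp_str[from_i+len_fp : len(inp_str)]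
--         else:
--             return inp_str[0: from_i] + temp
--
--     return
-- ===== SOURCE B (Python) =====
-- def flipIt(from_i, len_fp, inp_str):
--     if from_i > len(inp_str) - len_fp:
--         return inp_str
--     lo, hi, _ = slice(from_i, from_i + len_fp).indices(len(inp_str))
--     return ''.join(('-' if c == '+' else '+') if lo <= i < hi else c
--                    for i, c in enumerate(inp_str))
-- ===== Notes on version B (the rewrite author's own statement) =====
-- stated objective: simpler
-- what changed: Replaces A's slice-out-the-window, char-by-char temp accumulation and three-branch reassembly with one indexed pass over the whole string (flip inside the normalized window, copy outside) joined into the result.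
-- intended difference: On inputs with a reversed normalized window (guard false, from_i != 0, from_i+len_fp < len(inp_str), normalized stop index strictly before normalized start index, reachable only with a negative from_i or len_fp), A's prefix slice s[:from_i] and suffix slice s[from_i+len_fp:] overlap, so A returns a longer string with the overlap duplicated (e.g. flipIt(1, -1, 'ab') = 'aab'); B returns the string unchanged, the intended no-op for an empty flip window. — e.g. on flipIt(1, -1, "ab"): A returns "aab", B returns "ab"
import Mathlib
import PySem

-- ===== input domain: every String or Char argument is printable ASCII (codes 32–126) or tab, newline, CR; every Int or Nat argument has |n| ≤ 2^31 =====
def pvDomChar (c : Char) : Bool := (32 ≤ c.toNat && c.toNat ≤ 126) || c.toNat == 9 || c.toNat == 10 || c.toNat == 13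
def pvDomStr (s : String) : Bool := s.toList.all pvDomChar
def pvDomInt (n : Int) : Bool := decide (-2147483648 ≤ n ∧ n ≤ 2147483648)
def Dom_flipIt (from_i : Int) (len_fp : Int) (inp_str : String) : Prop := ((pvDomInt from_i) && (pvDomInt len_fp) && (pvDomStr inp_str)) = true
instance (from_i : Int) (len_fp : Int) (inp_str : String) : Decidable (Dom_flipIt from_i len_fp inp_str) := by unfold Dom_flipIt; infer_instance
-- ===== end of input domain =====

-- B rebuilds the whole output in a single indexed pass (flip inside the normalized window, copy
-- outside) instead of A's slice-out-window + accumulate-temp + three-branch reassembly.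

-- ===== PORT A =====
-- literal transliteration of A: guard, temp built char by char from the window slice, then the
-- three reassembly branches, each a concatenation of Python slices
def flipIt (from_i : Int) (len_fp : Int) (inp_str : String) : String :=
  if from_i > PySem.Str.len inp_str - len_fp then inp_str
  else
    let cs := inp_str.toList
    let temp := (PySem.List.slice cs (some from_i) (some (from_i + len_fp))).foldl
      (fun acc c => acc ++ [if c = '+' then '-' else '+']) []
    if from_i = 0 then
      String.ofList (temp ++ PySem.List.slice cs (some (from_i + len_fp)) (some (cs.length : Int)))
    else if from_i + len_fp < (cs.length : Int) then
      String.ofList (PySem.List.slice cs (some 0) (some from_i) ++ temp ++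
        PySem.List.slice cs (some (from_i + len_fp)) (some (cs.length : Int)))
    else
      String.ofList (PySem.List.slice cs (some 0) (some from_i) ++ temp)

-- ===== PORT B =====
-- slice(from_i, from_i+len_fp).indices(n) for step 1: each bound normalized Python-slice style
-- (hand port, exact for step 1: a negative bound is end-relative, then clamped into [0, n])
def pySliceIdx (n : Int) (i : Int) : Int := if i < 0 then max (n + i) 0 else min i n

def flipIt_alt (from_i : Int) (len_fp : Int) (inp_str : String) : String :=
  if from_i > PySem.Str.len inp_str - len_fp then inp_str
  else
    let n := PySem.Str.len inp_str
    let lo := pySliceIdx n from_i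
    let hi := pySliceIdx n (from_i + len_fp)
    String.ofList ((PySem.List.enumerate inp_str.toList).map
      (fun p => if lo ≤ p.1 ∧ p.1 < hi then (if p.2 = '+' then '-' else '+') else p.2))

-- ===== PRECONDITION & SPEC =====
-- On inputs whose normalized window is reversed (guard false, from_i ≠ 0, from_i + len_fp <
-- len(inp_str), and the normalized stop index falls strictly before the normalized start index —
-- only reachable with a negative from_i or len_fp), A's prefix slice s[:from_i] and suffix slice
-- s[from_i+len_fp:] overlap, so A returns a longer string with the overlap duplicated; B returns
-- the string unchanged — the intended no-op for an empty flip window.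
def D_flipIt (from_i : Int) (len_fp : Int) (inp_str : String) : Prop :=
  ¬(from_i > (inp_str.length : Int) - len_fp) ∧ from_i ≠ 0 ∧
  from_i + len_fp < (inp_str.length : Int) ∧
  PySem.List.clampIdx inp_str.length (from_i + len_fp) <
    PySem.List.clampIdx inp_str.length from_i
instance (from_i : Int) (len_fp : Int) (inp_str : String) : Decidable (D_flipIt from_i len_fp inp_str) := by
  unfold D_flipIt; infer_instance

def Spec_flipIt (from_i : Int) (len_fp : Int) (inp_str : String) (out : String) : Prop :=
  ¬ D_flipIt from_i len_fp inp_str → out = flipIt_alt from_i len_fp inp_str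
instance (from_i : Int) (len_fp : Int) (inp_str : String) (out : String) : Decidable (Spec_flipIt from_i len_fp inp_str out) := by
  unfold Spec_flipIt; infer_instance

def pvDiffWitness_flipIt : Int × Int × String := (1, -1, "ab")
def pvDiffWitnessOut_flipIt : String × String := ("aab", "ab")

-- ===== CLAIM (what is proved, stated in full; the proofs are below) =====
def Claim_unchanged_flipIt : Prop := ∀ (from_i : Int) (len_fp : Int) (inp_str : String), Dom_flipIt from_i len_fp inp_str → Spec_flipIt from_i len_fp inp_str (flipIt from_i len_fp inp_str)
def Claim_changed_flipIt : Prop := Dom_flipIt (pvDiffWitness_flipIt.1) (pvDiffWitness_flipIt.2.1) (pvDiffWitness_flipIt.2.2) ∧ D_flipIt (pvDiffWitness_flipIt.1) (pvDiffWitness_flipIt.2.1) (pvDiffWitness_flipIt.2.2) ∧ flipIt (pvDiffWitness_flipIt.1) (pvDiffWitness_flipIt.2.1) (pvDiffWitness_flipIt.2.2) = pvDiffWitnessOut_flipIt.1 ∧ flipIt_alt (pvDiffWitness_flipIt.1) (pvDiffWitness_flipIt.2.1) (pvDiffWitness_flipIt.2.2) = pvDiffWitnessOut_flipIt.2 ∧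 pvDiffWitnessOut_flipIt.1 ≠ pvDiffWitnessOut_flipIt.2
def Claim_exact_flipIt : Prop := ∀ (from_i : Int) (len_fp : Int) (inp_str : String), Dom_flipIt from_i len_fp inp_str → D_flipIt from_i len_fp inp_str → flipIt from_i len_fp inp_str ≠ flipIt_alt from_i len_fp inp_str

-- ===== LEMMAS AND PROOFS =====

-- B's pass after the window: every remaining index is ≥ hi, so nothing is flipped
theorem pass_after (f : Char → Char) (lo hi : Int) (cs : List Char) (s : Int) (h : hi ≤ s) :
    (PySem.List.enumerate cs s).map (fun p => if lo ≤ p.1 ∧ p.1 < hi then f p.2 else p.2) = cs := by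
  induction cs generalizing s with
  | nil => simp [PySem.List.enumerate]
  | cons c cs ih =>
      rw [PySem.List.enumerate_cons, List.map_cons, if_neg (by omega), ih (s + 1) (by omega)]

-- B's pass inside the window: flip up to hi, then copy
theorem pass_mid (f : Char → Char) (lo hi : Int) (cs : List Char) (s : Int)
    (h0 : lo ≤ s) (h1 : s ≤ hi) :
    (PySem.List.enumerate cs s).map (fun p => if lo ≤ p.1 ∧ p.1 < hi then f p.2 else p.2)
      = (cs.take (hi - s).toNat).map f ++ cs.drop (hi - s).toNat := by
  induction cs generalizing s with
  | nil => simp [PySem.List.enumerate]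
  | cons c cs ih =>
      rw [PySem.List.enumerate_cons, List.map_cons]
      by_cases hs : s < hi
      · have e1 : (hi - s).toNat = (hi - (s + 1)).toNat + 1 := by omega
        rw [if_pos (by omega), e1, List.take_succ_cons, List.drop_succ_cons, List.map_cons,
            List.cons_append, ih (s + 1) (by omega) (by omega)]
      · have e1 : (hi - s).toNat = 0 := by omega
        rw [if_neg (by omega), e1, List.take_zero, List.drop_zero, List.map_nil,
            List.nil_append, pass_after f lo hi cs (s + 1) (by omega)]

-- B's pass before the window: copy up to lo, flip up to hi, copy the rest
theorem pass_pre (f : Char → Char) (lo hi : Int) (cs : List Char) (s : Int)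
    (h0 : s ≤ lo) (h1 : lo ≤ hi) :
    (PySem.List.enumerate cs s).map (fun p => if lo ≤ p.1 ∧ p.1 < hi then f p.2 else p.2)
      = cs.take (lo - s).toNat
        ++ ((cs.drop (lo - s).toNat).take (hi - lo).toNat).map f
        ++ cs.drop (hi - s).toNat := by
  induction cs generalizing s with
  | nil => simp [PySem.List.enumerate]
  | cons c cs ih =>
      rw [PySem.List.enumerate_cons, List.map_cons]
      by_cases hs : s < lo
      · have e1 : (lo - s).toNat = (lo - (s + 1)).toNat + 1 := by omega
        have e2 : (hi - s).toNat = (hi - (s + 1)).toNat + 1 := by omega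
        rw [if_neg (by omega), e1, e2, List.take_succ_cons, List.drop_succ_cons,
            List.drop_succ_cons, List.cons_append, List.cons_append,
            ih (s + 1) (by omega)]
      · have hsl : s = lo := by omega
        by_cases hh : s < hi
        · have e1 : (lo - s).toNat = 0 := by omega
          have e2 : (hi - lo).toNat = (hi - (s + 1)).toNat + 1 := by omega
          have e3 : (hi - s).toNat = (hi - (s + 1)).toNat + 1 := by omega
          rw [if_pos (by omega), e1, e2, e3, List.take_zero, List.drop_zero, List.nil_append,
              List.take_succ_cons, List.drop_succ_cons, List.map_cons, List.cons_append,
              pass_mid f lo hi cs (s + 1) (by omega) (by omega)]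
        · have e1 : (lo - s).toNat = 0 := by omega
          have e2 : (hi - lo).toNat = 0 := by omega
          have e3 : (hi - s).toNat = 0 := by omega
          rw [if_neg (by omega), e1, e2, e3]
          simp only [List.take_zero, List.drop_zero, List.map_nil, List.nil_append]
          rw [pass_after f lo hi cs (s + 1) (by omega)]

-- pySliceIdx is clampIdx, cast to Int
theorem pySliceIdx_eq_clampIdx (n : Nat) (i : Int) :
    pySliceIdx (n : Int) i = (PySem.List.clampIdx n i : Int) := by
  simp only [pySliceIdx, PySem.List.clampIdx]
  split_ifs <;> omega

-- slice with explicit Int bounds, written through clampIdx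
theorem slice_eq_take_drop {α : Type} (xs : List α) (a b : Int) :
    PySem.List.slice xs (some a) (some b)
      = (xs.drop (PySem.List.clampIdx xs.length a)).take
          (PySem.List.clampIdx xs.length b - PySem.List.clampIdx xs.length a) := rfl

theorem clampIdx_le_len {α : Type} (xs : List α) (i : Int) :
    PySem.List.clampIdx xs.length i ≤ xs.length := by
  simp only [PySem.List.clampIdx]; split_ifs <;> omega

theorem clampIdx_len {α : Type} (xs : List α) :
    PySem.List.clampIdx xs.length (xs.length : Int) = xs.length := by
  simp only [PySem.List.clampIdx]; split_ifs <;> omega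

theorem clampIdx_zero (n : Nat) : PySem.List.clampIdx n (0 : Int) = 0 := by
  simp only [PySem.List.clampIdx]; split_ifs <;> omega

-- the B side, in the non-guard case, as take ++ flipped middle ++ drop
theorem flipIt_alt_main (from_i len_fp : Int) (inp_str : String)
    (hg : ¬ from_i > (inp_str.toList.length : Int) - len_fp)
    (hle : PySem.List.clampIdx inp_str.toList.length from_i ≤
           PySem.List.clampIdx inp_str.toList.length (from_i + len_fp)) :
    flipIt_alt from_i len_fp inp_str
      = String.ofList
          (inp_str.toList.take (PySem.List.clampIdx inp_str.toList.length from_i)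
           ++ (((inp_str.toList.drop (PySem.List.clampIdx inp_str.toList.length from_i)).take
                 (PySem.List.clampIdx inp_str.toList.length (from_i + len_fp)
                  - PySem.List.clampIdx inp_str.toList.length from_i)).map
                 (fun c => if c = '+' then '-' else '+'))
           ++ inp_str.toList.drop (PySem.List.clampIdx inp_str.toList.length (from_i + len_fp))) := by
  unfold flipIt_alt
  rw [if_neg (by simpa [PySem.Str.len_eq] using hg)]
  simp only [PySem.Str.len_eq, pySliceIdx_eq_clampIdx]
  set cs := inp_str.toList with hcs
  set lo := PySem.List.clampIdx cs.length from_i with hlo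
  set hi := PySem.List.clampIdx cs.length (from_i + len_fp) with hhi
  rw [pass_pre (fun c => if c = '+' then '-' else '+') (lo : Int) (hi : Int) cs 0
        (by positivity) (by exact_mod_cast hle)]
  have e1 : ((lo : Int) - 0).toNat = lo := by omega
  have e2 : ((hi : Int) - (lo : Int)).toNat = hi - lo := by omega
  have e3 : ((hi : Int) - 0).toNat = hi := by omega
  rw [e1, e2, e3]

-- A = B whenever the guard is false and the normalized window is well ordered
theorem flipIt_eq_main (from_i len_fp : Int) (inp_str : String)
    (hg : ¬ from_i > (inp_str.toList.length : Int) - len_fp)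
    (hle : PySem.List.clampIdx inp_str.toList.length from_i ≤
           PySem.List.clampIdx inp_str.toList.length (from_i + len_fp)) :
    flipIt from_i len_fp inp_str = flipIt_alt from_i len_fp inp_str := by
  rw [flipIt_alt_main from_i len_fp inp_str hg hle]
  unfold flipIt
  rw [if_neg (by simpa [PySem.Str.len_eq] using hg)]
  set cs := inp_str.toList with hcs
  set lo := PySem.List.clampIdx cs.length from_i with hlo
  set hi := PySem.List.clampIdx cs.length (from_i + len_fp) with hhi
  have hhin : hi ≤ cs.length := clampIdx_le_len cs _
  simp only [PySem.List.foldl_append_singleton_eq_map, List.nil_append,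
    slice_eq_take_drop, ← hlo, ← hhi, clampIdx_len, clampIdx_zero]
  have hdropfull : (cs.drop hi).take (cs.length - hi) = cs.drop hi :=
    List.take_of_length_le (by simp)
  split
  · next h0 =>
      have : lo = 0 := by rw [hlo, h0]; exact clampIdx_zero cs.length
      rw [hdropfull, this]
      simp
  · split
    · next h0 he =>
        rw [hdropfull]
        simp
    · next h0 he =>
        have hhin : hi = cs.length := by
          rw [hhi]; simp only [PySem.List.clampIdx]; split_ifs <;> omega
        rw [hhin]
        simp

-- ===== VERDICT (by name: the statement is the Claim_ definition above) =====
theorem flipIt_spec : Claim_unchanged_flipIt := by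
  intro from_i len_fp inp_str _ hnd
  unfold D_flipIt at hnd
  rw [show inp_str.length = inp_str.toList.length by simp] at hnd
  by_cases hg : from_i > (inp_str.toList.length : Int) - len_fp
  · unfold flipIt flipIt_alt
    rw [if_pos (by simpa [PySem.Str.len_eq] using hg),
        if_pos (by simpa [PySem.Str.len_eq] using hg)]
  · push Not at hnd
    by_cases h0 : from_i = 0
    · refine flipIt_eq_main from_i len_fp inp_str hg ?_
      rw [h0]
      rw [clampIdx_zero]
      omega
    · by_cases he : from_i + len_fp < (inp_str.toList.length : Int)
      · exact flipIt_eq_main from_i len_fp inp_str hg (hnd (by omega) h0 he)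
      · refine flipIt_eq_main from_i len_fp inp_str hg ?_
        have : PySem.List.clampIdx inp_str.toList.length (from_i + len_fp)
            = inp_str.toList.length := by
          simp only [PySem.List.clampIdx]; split_ifs <;> omega
        rw [this]
        exact clampIdx_le_len _ _

theorem flipIt_changed : Claim_changed_flipIt := by unfold Claim_changed_flipIt; decide

theorem flipIt_tight : Claim_exact_flipIt := by
  intro from_i len_fp inp_str _ hd heq
  unfold D_flipIt at hd
  rw [show inp_str.length = inp_str.toList.length by simp] at hd
  obtain ⟨hg, h0, he, hlt⟩ := hd
  have hg' : ¬ from_i > PySem.Str.len inp_str - len_fp := by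
    simpa [PySem.Str.len_eq] using hg
  have hlol := clampIdx_le_len inp_str.toList from_i
  have hlen := congrArg PySem.Str.len heq
  unfold flipIt flipIt_alt at hlen
  rw [if_neg hg', if_neg hg'] at hlen
  simp only [PySem.List.foldl_append_singleton_eq_map, List.nil_append, slice_eq_take_drop,
    clampIdx_len, clampIdx_zero] at hlen
  rw [if_neg h0, if_pos he] at hlen
  simp [PySem.Str.len_eq, PySem.List.length_enumerate] at hlen
  rw [show inp_str.length = inp_str.toList.length by simp] at hlen
  have hf : PySem.Str.len inp_str = (inp_str.toList.length : Int) := PySem.Str.len_eq inp_str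
  omega
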